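-- pv_equiv track=rewrite | github.com/Alpha-778/CodeForces-solution-in-Python | 230B T-primes.py | t_primes
-- ===== SOURCE A (Python) =====
-- import math
--
-- def sieve(limit):
--     is_prime = [True] * (limit + 1)
--     is_prime[0] = is_prime[1] = False
--     for i in range(2, int(math.sqrt(limit)) + 1):
--         if is_prime[i]:
--             for j in range(i * i, limit + 1, i):
--                 is_prime[j] = False
--     return [i for i, prime in enumerate(is_prime) if prime]
--
-- def t_primes(numbers):
--     max_val = int(1e6)
--     primes = sieve(max_val)
--     t_prime_set = set(p * p for p in primes)
--
--     results = []
--     for x in numbers: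
--         if x in t_prime_set:
--             results.append("YES")
--         else:
--             results.append("NO")
--     return results
-- ===== SOURCE B (Python) =====
-- import math
--
-- def _is_tprime(x):
--     # YES iff x = r*r with r prime
--     if x < 4:
--         return False
--     r = math.isqrt(x)
--     if r * r != x:
--         return False
--     for d in range(2, math.isqrt(r) + 1):
--         if r % d == 0:
--             return False
--     return True
--
-- def t_primes(numbers):
--     return ["YES" if _is_tprime(x) else "NO" for x in numbers]
-- ===== Notes on version B (the rewrite author's own statement) =====
-- stated objective: faster
-- what changed: Replaces the per-call Sieve of Eratosthenes up to 10^6 plus precomputed prime-square set with a direct per-query test: x is T-prime iff isqrt(x)^2 = x and isqrt(x) is prime by trial division up to its square root.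
import Mathlib
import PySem

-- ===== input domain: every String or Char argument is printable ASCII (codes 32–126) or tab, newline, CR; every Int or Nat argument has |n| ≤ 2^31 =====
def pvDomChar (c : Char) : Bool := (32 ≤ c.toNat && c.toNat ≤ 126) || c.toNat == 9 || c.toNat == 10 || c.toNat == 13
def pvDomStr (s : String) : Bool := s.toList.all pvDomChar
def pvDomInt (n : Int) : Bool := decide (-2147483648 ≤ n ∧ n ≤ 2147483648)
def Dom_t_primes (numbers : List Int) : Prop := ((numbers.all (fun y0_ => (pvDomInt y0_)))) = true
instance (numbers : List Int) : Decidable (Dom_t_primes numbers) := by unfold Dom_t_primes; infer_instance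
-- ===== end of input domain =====

-- B drops A's per-call 10^6 sieve and precomputed square set and answers each query directly:
-- x is T-prime iff isqrt(x)^2 = x and isqrt(x) is prime by trial division (measurably faster: no per-call precomputation).

-- ===== PORT A =====
-- sieve(limit): is_prime = [True]*(limit+1); is_prime[0] = is_prime[1] = False; mark multiples; collect indices.
-- int(math.sqrt(limit)) is ported as Nat.sqrt: exact here, limit = 10^6 is a perfect square (math.sqrt(1e6) = 1000.0).
-- The comprehension [i for i, prime in enumerate(is_prime) if prime] pairs each index 0..limit with its entry;
-- ported over the index range 0..limit (exact: is_prime always has length limit+1).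
-- All loop indices i, j are non-negative (i >= 2, j >= i*i), so .toNat is exact.
def pvSieve (limit : Int) : List Int :=
  let isPrime : Array Bool := Array.replicate (limit + 1).toNat true
  let isPrime := isPrime.setIfInBounds 0 false
  let isPrime := isPrime.setIfInBounds 1 false
  let isPrime := (PySem.List.pyRange 2 ((limit.toNat.sqrt : Int) + 1) 1).foldl
    (fun a i =>
      if a[i.toNat]! then
        (PySem.List.pyRange (i * i) (limit + 1) i).foldl
          (fun a j => a.setIfInBounds j.toNat false) a
      else a) isPrime
  (PySem.List.pyRange 0 (limit + 1) 1).filter (fun i => isPrime[i.toNat]!)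

-- t_prime_set = set(p*p for p in primes) is used only for the membership test 'x in t_prime_set';
-- it is ported as the underlying list of squares (exact: x ∈ set(l) ↔ x ∈ l; PySem.Set.ofList's
-- quadratic dedup of the 78498 squares is not evaluable in reasonable time, and membership ignores duplicates).
def t_primes (numbers : List Int) : List String :=
  let maxVal : Int := 1000000
  let primes := pvSieve maxVal
  let tPrimeSet := primes.map (fun p => p * p)
  numbers.foldl (fun results x =>
    if tPrimeSet.contains x then results ++ ["YES"] else results ++ ["NO"]) []

-- ===== PORT B =====
-- math.isqrt(x) for x ≥ 0 is exactly Nat.sqrt x.toNat (both are ⌊√x⌋).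
-- math.isqrt(x) for x ≥ 0 is exactly Nat.sqrt x.toNat (both are ⌊√x⌋).
def pvIsTPrime (x : Int) : Bool :=
  if x < 4 then false
  else
    let r : Int := (x.toNat.sqrt : Int)
    if r * r ≠ x then false
    else (PySem.List.pyRange 2 ((r.toNat.sqrt : Int) + 1) 1).all
      (fun d => !(PySem.Int.mod r d == 0))

def t_primes_alt (numbers : List Int) : List String :=
  numbers.map (fun x => if pvIsTPrime x then "YES" else "NO")


-- ===== PRECONDITION & SPEC =====
def Spec_t_primes (numbers : List Int) (out : List String) : Prop := out = t_primes_alt numbers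
instance (numbers : List Int) (out : List String) : Decidable (Spec_t_primes numbers out) := by unfold Spec_t_primes; infer_instance

-- ===== CLAIM (what is proved, stated in full; the proofs are below) =====
def Claim_equal_t_primes : Prop := ∀ (numbers : List Int), Dom_t_primes numbers → Spec_t_primes numbers (t_primes numbers)

-- ===== LEMMAS AND PROOFS =====

lemma pv_getbang_oob (a : Array Bool) (n : Nat) (h : a.size ≤ n) : a[n]! = false := by
  simp [Array.getElem!_eq_getD, Array.getD_eq_getD_getElem?, Array.getElem?_eq_none_iff.mpr h]

lemma pv_getbang_setIfInBounds (a : Array Bool) (i n : Nat) (v : Bool) :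
    (a.setIfInBounds i v)[n]! = if i = n ∧ n < a.size then v else a[n]! := by
  simp only [Array.getElem!_eq_getD, Array.getD_eq_getD_getElem?, Array.getElem?_setIfInBounds]
  by_cases h1 : i = n
  · subst h1
    by_cases h2 : i < a.size
    · simp [h2]
    · simp [h2]
  · simp only [if_neg (fun h : i = n ∧ n < a.size => h1 h.1), if_neg h1]

lemma pv_getbang_replicate (m n : Nat) : (Array.replicate m true)[n]! = decide (n < m) := by
  simp only [Array.getElem!_eq_getD, Array.getD_eq_getD_getElem?, Array.getElem?_replicate]
  by_cases h : n < m <;> simp [h]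

lemma pv_mark_size (l : List Int) (a : Array Bool) :
    (l.foldl (fun a j => a.setIfInBounds j.toNat false) a).size = a.size := by
  induction l generalizing a with
  | nil => rfl
  | cons j l ih => simp [List.foldl_cons, ih, Array.size_setIfInBounds]

lemma pv_mark_getbang (l : List Int) (hl : ∀ j ∈ l, 0 ≤ j) (a : Array Bool) (n : Nat) :
    (l.foldl (fun a j => a.setIfInBounds j.toNat false) a)[n]! =
      if (n : Int) ∈ l ∧ n < a.size then false else a[n]! := by
  induction l generalizing a with
  | nil => simp
  | cons j l ih =>
    have hj : 0 ≤ j := hl j (by simp)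
    rw [List.foldl_cons, ih (fun x hx => hl x (by simp [hx]))]
    rw [Array.size_setIfInBounds, pv_getbang_setIfInBounds]
    have hjn : j.toNat = n ↔ (n : Int) = j := by omega
    by_cases h1 : (n : Int) = j <;> by_cases h2 : n < a.size  <;>
      simp [h1, h2, hjn, List.mem_cons]

def pvStep (limit : Int) (a : Array Bool) (i : Int) : Array Bool :=
  if a[i.toNat]! then
    (PySem.List.pyRange (i * i) (limit + 1) i).foldl
      (fun a j => a.setIfInBounds j.toNat false) a
  else a

lemma pv_step_size (limit : Int) (a : Array Bool) (i : Int) : (pvStep limit a i).size = a.size := by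
  unfold pvStep; split <;> simp [pv_mark_size]

lemma pv_fold_size (limit : Int) (l : List Int) (a : Array Bool) :
    (l.foldl (pvStep limit) a).size = a.size := by
  induction l generalizing a with
  | nil => rfl
  | cons i l ih => simp [List.foldl_cons, ih, pv_step_size]

lemma pv_step_prime (limit : Int) (a : Array Bool) (i : Int) (hi : 2 ≤ i) (p : Nat)
    (hp : Nat.Prime p) : (pvStep limit a i)[p]! = a[p]! := by
  unfold pvStep
  split
  · rw [pv_mark_getbang]
    · rw [if_neg]
      rintro ⟨hmem, -⟩
      rw [PySem.List.mem_pyRange_iff_of_pos (by omega)] at hmem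
      obtain ⟨h1, h2, k, hk⟩ := hmem
      -- i divides p, 2 ≤ i, i*i ≤ p: contradicts primality of p
      have hdvd : i ∣ (p : Int) := ⟨i + k, by linarith⟩
      have hdvd' : i.toNat ∣ p := by
        have : (i.toNat : Int) ∣ (p : Int) := by rwa [Int.toNat_of_nonneg (by omega)]
        exact_mod_cast this
      have hlt : i.toNat < p := by nlinarith [Int.toNat_of_nonneg (show (0:Int) ≤ i by omega)]
      rcases (Nat.Prime.eq_one_or_self_of_dvd hp _ hdvd') with h | h <;> omega
    · intro j hj
      rw [PySem.List.mem_pyRange_iff_of_pos (by omega)] at hj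
      nlinarith [hj.1]
  · rfl

lemma pv_fold_prime (limit : Int) (l : List Int) (hl : ∀ i ∈ l, 2 ≤ i) (a : Array Bool) (p : Nat)
    (hp : Nat.Prime p) : (l.foldl (pvStep limit) a)[p]! = a[p]! := by
  induction l generalizing a with
  | nil => rfl
  | cons i l ih =>
    rw [List.foldl_cons, ih (fun x hx => hl x (by simp [hx])),
      pv_step_prime _ _ _ (hl i (by simp)) _ hp]

lemma pv_step_mono (limit : Int) (a : Array Bool) (i : Int) (hi : 2 ≤ i) (n : Nat)
    (h : a[n]! = false) : (pvStep limit a i)[n]! = false := by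
  unfold pvStep
  split
  · rw [pv_mark_getbang]
    · split <;> simp [h]
    · intro j hj
      rw [PySem.List.mem_pyRange_iff_of_pos (by omega)] at hj
      nlinarith [hj.1]
  · exact h

lemma pv_fold_mono (limit : Int) (l : List Int) (hl : ∀ i ∈ l, 2 ≤ i) (a : Array Bool) (n : Nat)
    (h : a[n]! = false) : (l.foldl (pvStep limit) a)[n]! = false := by
  induction l generalizing a with
  | nil => exact h
  | cons i l ih =>
    exact ih (fun x hx => hl x (by simp [hx])) _
      (pv_step_mono _ _ _ (hl i (by simp)) _ h)

def pvInit : Array Bool :=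
  ((Array.replicate 1000001 true).setIfInBounds 0 false).setIfInBounds 1 false

lemma pv_init_size : pvInit.size = 1000001 := by
  simp [pvInit, Array.size_setIfInBounds]

lemma pv_init_getbang (n : Nat) : pvInit[n]! = decide (2 ≤ n ∧ n ≤ 1000000) := by
  unfold pvInit
  rw [pv_getbang_setIfInBounds, pv_getbang_setIfInBounds, pv_getbang_replicate]
  simp only [Array.size_setIfInBounds, Array.size_replicate]
  by_cases h0 : n = 0
  · simp [h0]
  · by_cases h1 : n = 1
    · simp [h1]
    · rw [if_neg (by omega), if_neg (by omega)]
      simp only [decide_eq_decide]; omega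

lemma pv_final_getbang (n : Nat) :
    ((PySem.List.pyRange 2 1001 1).foldl (pvStep 1000000) pvInit)[n]! =
      decide (n ≤ 1000000 ∧ Nat.Prime n) := by
  have hge2 : ∀ i ∈ PySem.List.pyRange 2 1001 1, (2:Int) ≤ i := by
    intro i hi; rw [PySem.List.mem_pyRange_one] at hi; omega
  by_cases hbig : 1000000 < n
  · rw [pv_getbang_oob _ _ (by rw [pv_fold_size, pv_init_size]; omega)]
    simp; omega
  · by_cases hsm : n < 2
    · rw [pv_fold_mono _ _ hge2 _ _ (by rw [pv_init_getbang]; simp; omega)]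
      have : ¬ Nat.Prime n := by
        rcases (show n = 0 ∨ n = 1 by omega) with h | h <;> subst h <;> decide
      simp [this]
    · by_cases hpr : Nat.Prime n
      · rw [pv_fold_prime _ _ hge2 _ _ hpr, pv_init_getbang]
        simp [hpr]; omega
      · -- composite n, 2 ≤ n ≤ 10^6: marked at step p = minFac n
        have hn1 : n ≠ 1 := by omega
        have hp : Nat.Prime n.minFac := Nat.minFac_prime hn1
        have hdvd : n.minFac ∣ n := Nat.minFac_dvd n
        have hpp : n.minFac * n.minFac ≤ n := by
          have := Nat.minFac_sq_le_self (by omega) hpr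
          nlinarith [this]
        have hp2 : 2 ≤ n.minFac := hp.two_le
        have hple : n.minFac ≤ 1000 := by nlinarith
        set p : Nat := n.minFac with hpdef
        have hcons : PySem.List.pyRange (p:Int) 1001 1 = (p:Int) :: PySem.List.pyRange ((p:Int)+1) 1001 1 :=
          PySem.List.pyRange_one_cons (a := (p:Int)) (b := 1001) (by omega)
        have hsplit : PySem.List.pyRange 2 1001 1 =
            PySem.List.pyRange 2 (p:Int) 1 ++ (p:Int) :: PySem.List.pyRange ((p:Int)+1) 1001 1 := by
          rw [PySem.List.pyRange_one_append 2 (p:Int) 1001 (by omega) (by omega), hcons]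
        rw [hsplit, List.foldl_append, List.foldl_cons]
        set a1 := (PySem.List.pyRange 2 (p:Int) 1).foldl (pvStep 1000000) pvInit with ha1
        have ha1size : a1.size = 1000001 := by rw [pv_fold_size, pv_init_size]
        have ha1p : a1[((p:Int)).toNat]! = true := by
          rw [Int.toNat_natCast]
          rw [pv_fold_prime _ _ (fun i hi => by rw [PySem.List.mem_pyRange_one] at hi; omega) _ _ hp,
            pv_init_getbang]
          simp; omega
        have hstep : (pvStep 1000000 a1 (p:Int))[n]! = false := by
          unfold pvStep
          rw [if_pos ha1p]
          rw [pv_mark_getbang _ (fun j hj => by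
            rw [PySem.List.mem_pyRange_iff_of_pos (by omega)] at hj
            nlinarith [hj.1])]
          rw [if_pos]
          constructor
          · rw [PySem.List.mem_pyRange_iff_of_pos (by omega)]
            refine ⟨by exact_mod_cast hpp, by push_cast; omega, ?_⟩
            obtain ⟨k, hk⟩ := hdvd
            exact ⟨(k:Int) - p, by push_cast [hk]; ring⟩
          · omega
        rw [pv_fold_mono _ _ (fun i hi => by rw [PySem.List.mem_pyRange_one] at hi; omega) _ _ hstep]
        simp [hpr]

lemma pv_sqrt_1000000 : Nat.sqrt 1000000 = 1000 := by
  rw [show (1000000:Nat) = 1000 * 1000 by norm_num, Nat.sqrt_eq]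

lemma pv_mem_sieve (q : Int) :
    q ∈ pvSieve 1000000 ↔ ∃ n : Nat, n ≤ 1000000 ∧ Nat.Prime n ∧ q = (n : Int) := by
  have hfold : ∀ a : Array Bool,
      (PySem.List.pyRange 2 ((((1000000:Int)).toNat.sqrt : Int) + 1) 1).foldl
        (fun a i =>
          if a[i.toNat]! then
            (PySem.List.pyRange (i * i) ((1000000:Int) + 1) i).foldl
              (fun a j => a.setIfInBounds j.toNat false) a
          else a) a
      = (PySem.List.pyRange 2 1001 1).foldl (pvStep 1000000) a := by
    intro a
    have h1 : ((1000000:Int)).toNat.sqrt = 1000 := by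
      rw [show ((1000000:Int)).toNat = 1000000 from rfl, pv_sqrt_1000000]
    rw [h1]
    have h2 : (fun (a : Array Bool) (i : Int) =>
        if a[i.toNat]! then
          (PySem.List.pyRange (i * i) ((1000000:Int) + 1) i).foldl
            (fun a j => a.setIfInBounds j.toNat false) a
        else a) = pvStep 1000000 := by
      funext a i; rfl
    rw [show ((1000:Nat):Int) + 1 = 1001 by norm_num, h2]
  have hinit : ((Array.replicate ((1000000:Int)+1).toNat true).setIfInBounds 0 false).setIfInBounds 1 false = pvInit := by
    rw [pvInit, show ((1000000:Int)+1).toNat = 1000001 from rfl]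
  unfold pvSieve
  simp only [hfold, hinit, List.mem_filter, PySem.List.mem_pyRange_one, pv_final_getbang,
    decide_eq_true_eq]
  constructor
  · rintro ⟨⟨h0, h1⟩, h2, h3⟩
    exact ⟨q.toNat, h2, h3, by omega⟩
  · rintro ⟨n, hn, hp, rfl⟩
    have h2 : 2 ≤ n := hp.two_le
    refine ⟨⟨by omega, by omega⟩, by simpa using hn, by simpa using hp⟩

lemma pv_isTPrime_iff (x : Int) :
    pvIsTPrime x = true ↔ ∃ r : Nat, Nat.Prime r ∧ x = (r : Int) * r := by
  unfold pvIsTPrime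
  by_cases hx4 : x < 4
  · simp only [if_pos hx4, Bool.false_eq_true, false_iff]
    rintro ⟨r, hp, rfl⟩
    have := hp.two_le
    have : (2:Int) ≤ (r:Int) := by exact_mod_cast this
    nlinarith
  · rw [if_neg hx4]
    set m : Nat := x.toNat.sqrt with hm
    by_cases hsq : (m:Int) * (m:Int) ≠ x
    · simp only [if_pos hsq, Bool.false_eq_true, false_iff]
      rintro ⟨r, hp, hxe⟩
      apply hsq
      have hxn : x.toNat = r * r := by omega
      rw [hm, hxn, Nat.sqrt_eq]
      omega
    · rw [ne_eq, not_not] at hsq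
      rw [if_neg (by simpa using hsq)]
      have hm2 : 2 ≤ m := by nlinarith [hsq]
      rw [List.all_eq_true]
      constructor
      · intro h
        refine ⟨m, ?_, hsq.symm⟩
        rw [Nat.prime_def_le_sqrt]
        refine ⟨hm2, fun d hd2 hdle hdvd => ?_⟩
        have hmem : (d:Int) ∈ PySem.List.pyRange 2 (((m:Int)).toNat.sqrt + 1) 1 := by
          rw [PySem.List.mem_pyRange_one, Int.toNat_natCast]
          constructor <;> [exact_mod_cast hd2; exact_mod_cast Nat.lt_succ_of_le hdle]
        have := h _ hmem
        simp only [Bool.not_eq_eq_eq_not, Bool.not_true, beq_eq_false_iff_ne, ne_eq] at this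
        apply this
        rw [PySem.Int.mod_eq_zero_iff_dvd]
        exact_mod_cast hdvd
      · rintro ⟨r, hp, hxe⟩
        have hmr : m = r := by
          have hxn : x.toNat = r * r := by omega
          rw [hm, hxn, Nat.sqrt_eq]
        subst hmr
        intro d hd
        rw [PySem.List.mem_pyRange_one, Int.toNat_natCast] at hd
        simp only [Bool.not_eq_eq_eq_not, Bool.not_true, beq_eq_false_iff_ne, ne_eq]
        rw [PySem.Int.mod_eq_zero_iff_dvd]
        intro hdvd
        have hd0 : 0 ≤ d := by omega
        have hdvd' : d.toNat ∣ m := by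
          have : (d.toNat : Int) ∣ (m:Int) := by rwa [Int.toNat_of_nonneg hd0]
          exact_mod_cast this
        exact (Nat.prime_def_le_sqrt.mp hp).2 d.toNat (by omega) (by omega) hdvd'

lemma pv_elem (x : Int) (hx : -2147483648 ≤ x ∧ x ≤ 2147483648) :
    ((pvSieve 1000000).map (fun p => p * p)).contains x = pvIsTPrime x := by
  rw [Bool.eq_iff_iff, List.contains_iff_mem, pv_isTPrime_iff, List.mem_map]
  constructor
  · rintro ⟨q, hq, rfl⟩
    obtain ⟨n, hn, hp, rfl⟩ := (pv_mem_sieve q).mp hq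
    exact ⟨n, hp, rfl⟩
  · rintro ⟨r, hp, rfl⟩
    refine ⟨(r:Int), (pv_mem_sieve _).mpr ⟨r, ?_, hp, rfl⟩, rfl⟩
    by_contra hbig
    have h1 : (1000001 : Int) ≤ (r:Int) := by exact_mod_cast Nat.succ_le_of_lt (Nat.lt_of_not_le hbig)
    nlinarith [hx.2]


-- ===== VERDICT (by name: the statement is the Claim_ definition above) =====
theorem t_primes_spec : Claim_equal_t_primes := by
  intro numbers hdom
  unfold Spec_t_primes t_primes t_primes_alt
  show
    List.foldl (fun results x =>
      if (List.map (fun p => p * p) (pvSieve 1000000)).contains x = true then results ++ ["YES"]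
      else results ++ ["NO"]) [] numbers =
    List.map (fun x => if pvIsTPrime x = true then "YES" else "NO") numbers
  rw [show (fun (results : List String) (x : Int) =>
      if ((pvSieve 1000000).map (fun p => p * p)).contains x then results ++ ["YES"]
      else results ++ ["NO"]) =
      fun (results : List String) (x : Int) =>
        results ++ [if ((pvSieve 1000000).map (fun p => p * p)).contains x then "YES" else "NO"]
    from by funext res x; split <;> rfl]
  rw [PySem.List.foldl_append_singleton_eq_map, List.nil_append]
  refine List.map_congr_left (fun x hx => ?_)
  rw [pv_elem x (by simpa [pvDomInt] using List.all_eq_true.mp hdom x hx)]
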